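-- pv_equiv track=rewrite | github.com/wjddnjs1010/codetree-TILs | 240910/등장하지 않는 문자열의 길이/length-of-string-that-does-not-appear.py | find_min_unique_substring_length
-- ===== SOURCE A (Python) =====
-- def find_min_unique_substring_length(s):
--     n = len(s)
--
--     # 1부터 n까지의 길이로 부분 문자열을 검사
--     for length in range(1, n + 1):
--         seen_substrings = set()  # 이미 본 부분 문자열을 저장할 집합
--
--         for i in range(n - length + 1):
--             substring = s[i:i + length]  # 길이 length의 부분 문자열 추출
--
--             if substring in seen_substrings:
--                 break  # 중복이 발생하면 다음 길이로 이동
--             seen_substrings.add(substring)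
--         else:
--             # break가 발생하지 않고 정상적으로 탐색이 끝났다면, 이 길이가 답이다
--             return length
-- ===== SOURCE B (Python) =====
-- def find_min_unique_substring_length(s):
--     # Longest repeated substring via per-gap match runs; answer is that + 1.
--     n = len(s)
--     best = 0
--     for d in range(1, n):
--         if n - d <= best:
--             break  # no run at gap d can exceed n - d
--         run = 0
--         for i in range(n - d - 1, -1, -1):
--             run = run + 1 if s[i] == s[i + d] else 0
--             if run > best:
--                 best = run
--     return best + 1
-- ===== Notes on version B (the rewrite author's own statement) =====
-- stated objective: alternative
-- what changed: Instead of scanning candidate lengths and hashing all substrings of each length into a set, B computes the longest repeated substring length directly as the longest run of matches s[i]==s[i+d] over every gap d, and returns that + 1.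
-- outside the precondition, e.g. on find_min_unique_substring_length(''): A returns None, B returns 1
import Mathlib
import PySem

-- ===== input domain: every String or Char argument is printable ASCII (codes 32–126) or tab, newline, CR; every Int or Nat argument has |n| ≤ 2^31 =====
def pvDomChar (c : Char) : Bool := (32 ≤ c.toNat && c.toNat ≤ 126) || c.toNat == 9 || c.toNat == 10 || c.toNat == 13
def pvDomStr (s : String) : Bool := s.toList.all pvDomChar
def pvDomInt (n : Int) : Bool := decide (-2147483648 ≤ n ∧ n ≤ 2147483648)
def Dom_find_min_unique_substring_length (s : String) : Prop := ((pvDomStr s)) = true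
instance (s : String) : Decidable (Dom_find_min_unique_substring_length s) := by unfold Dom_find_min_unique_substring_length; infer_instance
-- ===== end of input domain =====

-- B replaces A's length-by-length substring-set search with a per-gap match-run
-- computation of the longest repeated substring length (alternative algorithm,
-- same exact result); Pre_ excludes only the empty string, where A returns None.


-- ===== PORT A =====
-- the inner 'for i in range(n - length + 1)' loop with the seen_substrings set;
-- returns true iff the loop completes with no break
def pvScanA (cs : List Char) (L : Int) : List Int → PySem.Set (List Char) → Bool
  | [], _ => true
  | i :: rest, seen =>
    let substring := PySem.List.slice cs (some i) (some (i + L))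
    if PySem.Set.contains seen substring then false
    else pvScanA cs L rest (PySem.Set.add seen substring)

-- the outer 'for length in range(1, n + 1)' loop; the [] case is Python's
-- fall-through return None (reached only for the empty string, excluded by Pre_)
def pvOuterA (cs : List Char) (n : Int) : List Int → Int
  | [] => 0
  | length :: rest =>
    if pvScanA cs length (PySem.List.pyRange 0 (n - length + 1) 1) PySem.Set.empty
    then length else pvOuterA cs n rest

def find_min_unique_substring_length (s : String) : Int :=
  let cs := s.toList
  let n : Int := PySem.Str.len s
  pvOuterA cs n (PySem.List.pyRange 1 (n + 1) 1)

-- ===== PORT B =====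
-- the 'for d in range(1, n)' loop with its early break (no run at gap d can
-- exceed n - d); the break returns the accumulated best
def pvLoopB (cs : List Char) (n : Int) : List Int → Int → Int
  | [], best => best
  | d :: rest, best =>
    if n - d ≤ best then best
    else pvLoopB cs n rest
      ((PySem.List.pyRange (n - d - 1) (-1) (-1)).foldl
        (fun (p : Int × Int) i =>
          let run := if PySem.List.pyGetD cs i ' ' = PySem.List.pyGetD cs (i + d) ' '
                     then p.1 + 1 else 0
          (run, if run > p.2 then run else p.2))
        (0, best)).2

def find_min_unique_substring_length_alt (s : String) : Int :=
  let cs := s.toList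
  let n : Int := PySem.Str.len s
  let best := pvLoopB cs n (PySem.List.pyRange 1 n 1) 0
  best + 1

-- ===== PRECONDITION & SPEC =====
-- Pre_ excludes exactly the empty string: there A's outer loop body never runs
-- and the Python function returns None, which is not an Int.
def Pre_find_min_unique_substring_length (s : String) : Prop := s ≠ ""
instance (s : String) : Decidable (Pre_find_min_unique_substring_length s) := by unfold Pre_find_min_unique_substring_length; infer_instance
def pvWitness_find_min_unique_substring_length : String := "aba"

def Spec_find_min_unique_substring_length (s : String) (out : Int) : Prop := out = find_min_unique_substring_length_alt s
instance (s : String) (out : Int) : Decidable (Spec_find_min_unique_substring_length s out) := by unfold Spec_find_min_unique_substring_length; infer_instance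

-- ===== CLAIM (what is proved, stated in full; the proofs are below) =====
def Claim_equal_find_min_unique_substring_length : Prop := ∀ (s : String), Dom_find_min_unique_substring_length s → Pre_find_min_unique_substring_length s → Spec_find_min_unique_substring_length s (find_min_unique_substring_length s)

-- ===== LEMMAS AND PROOFS =====

-- the length-L window of cs starting at position i
def pvSub (cs : List Char) (i L : Nat) : List Char := (cs.drop i).take L

-- some length-L window occurs at two different positions
def pvDup (cs : List Char) (L : Nat) : Prop :=
  ∃ i j : Nat, i < j ∧ j + L ≤ cs.length ∧ pvSub cs i L = pvSub cs j L

-- length of the run of matches cs[t] = cs[t+d] starting at t = i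
def pvStreak (cs : List Char) (d : Nat) (i : Nat) : Nat :=
  if h : i + d < cs.length ∧ cs.getD i ' ' = cs.getD (i + d) ' ' then
    pvStreak cs d (i + 1) + 1
  else 0
termination_by cs.length - i
decreasing_by omega

-- max of pvStreak cs d over start positions i ∈ [0, a]
def pvMaxRun (cs : List Char) (d : Nat) : Nat → Nat
  | 0 => pvStreak cs d 0
  | a + 1 => max (pvMaxRun cs d a) (pvStreak cs d (a + 1))

-- max of pvMaxRun over gaps d ∈ [1, dm] (0 for dm = 0)
def pvBig (cs : List Char) : Nat → Nat
  | 0 => 0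
  | dm + 1 => max (pvBig cs dm) (pvMaxRun cs (dm + 1) (cs.length - (dm + 1) - 1))

lemma pvStreak_pos (cs : List Char) (d i : Nat) (h1 : i + d < cs.length)
    (h2 : cs.getD i ' ' = cs.getD (i + d) ' ') :
    pvStreak cs d i = pvStreak cs d (i + 1) + 1 := by
  rw [pvStreak]; rw [dif_pos ⟨h1, h2⟩]

lemma pvStreak_zero (cs : List Char) (d i : Nat)
    (h : ¬(i + d < cs.length ∧ cs.getD i ' ' = cs.getD (i + d) ' ')) :
    pvStreak cs d i = 0 := by
  rw [pvStreak]; rw [dif_neg h]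

-- ---------- A side: scan/loop characterisation ----------

lemma pvScanA_true_iff (cs : List Char) (L : Int) :
    ∀ (is : List Int) (seen : PySem.Set (List Char)),
      pvScanA cs L is seen = true ↔
        ((is.map (fun i => PySem.List.slice cs (some i) (some (i + L)))).Nodup ∧
         ∀ x ∈ is.map (fun i => PySem.List.slice cs (some i) (some (i + L))), x ∉ seen) := by
  intro is
  induction is with
  | nil => intro seen; simp [pvScanA]
  | cons i rest ih =>
    intro seen
    simp only [pvScanA, List.map_cons]
    by_cases hmem : (PySem.List.slice cs (some i) (some (i + L))) ∈ seen
    · have hc : PySem.Set.contains seen (PySem.List.slice cs (some i) (some (i + L))) = true :=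
        (PySem.Set.contains_iff _ _).mpr hmem
      rw [hc]
      simp only [if_true]
      exact iff_of_false (by simp) (fun h => h.2 _ List.mem_cons_self hmem)
    · have hc : PySem.Set.contains seen (PySem.List.slice cs (some i) (some (i + L))) = false := by
        rcases Bool.eq_false_or_eq_true
          (PySem.Set.contains seen (PySem.List.slice cs (some i) (some (i + L)))) with h | h
        · exact absurd ((PySem.Set.contains_iff _ _).mp h) hmem
        · exact h
      rw [hc]
      simp only [Bool.false_eq_true, if_false]
      rw [PySem.Set.add_of_not_mem hmem]
      rw [ih (seen ++ [PySem.List.slice cs (some i) (some (i + L))])]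
      constructor
      · rintro ⟨hnd, hall⟩
        refine ⟨List.nodup_cons.mpr ⟨?_, hnd⟩, ?_⟩
        · intro hsubmem
          have h2 := hall _ hsubmem
          simp at h2
        · intro x hx
          rcases List.mem_cons.mp hx with rfl | hx'
          · exact hmem
          · have h2 := hall _ hx'
            simp only [List.mem_append, List.mem_singleton, not_or] at h2
            exact h2.1
      · rintro ⟨hnd, hall⟩
        have hnd' := List.nodup_cons.mp hnd
        refine ⟨hnd'.2, ?_⟩
        intro x hx
        simp only [List.mem_append, List.mem_singleton, not_or]
        exact ⟨hall _ (List.mem_cons_of_mem _ hx), fun he => hnd'.1 (he ▸ hx)⟩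

lemma mapSlice_eq_windows (cs : List Char) (L m : Nat) :
    (PySem.List.pyRange 0 (m : Int) 1).map
        (fun i => PySem.List.slice cs (some i) (some (i + (L : Int)))) =
      (List.range m).map (fun k => pvSub cs k L) := by
  rw [PySem.List.pyRange_one]
  rw [List.map_map]
  apply List.map_congr_left
  intro k _
  simp only [Function.comp_apply, zero_add]
  rw [PySem.List.slice_natCast_add]
  rfl

lemma windows_nodup_iff (cs : List Char) (L : Nat) (hLn : L ≤ cs.length) :
    ((List.range (cs.length - L + 1)).map (fun k => pvSub cs k L)).Nodup ↔ ¬ pvDup cs L := by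
  have hiff : ((List.range (cs.length - L + 1)).map (fun k => pvSub cs k L)).Nodup ↔
      ∀ (i j : Nat), i < cs.length - L + 1 → j < cs.length - L + 1 → i < j →
        pvSub cs i L ≠ pvSub cs j L := by
    show List.Pairwise _ _ ↔ _
    rw [List.pairwise_iff_getElem]
    simp only [List.length_map, List.length_range, List.getElem_map, List.getElem_range]
  rw [hiff]
  constructor
  · rintro h ⟨i, j, hij, hjL, heq⟩
    exact h i j (by omega) (by omega) hij heq
  · intro h i j hi hj hij heq
    exact h ⟨i, j, hij, by omega, heq⟩

lemma scan_iff_nodup (cs : List Char) (L : Nat) (hLn : L ≤ cs.length) :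
    (pvScanA cs (L : Int)
        (PySem.List.pyRange 0 ((cs.length : Int) - (L : Int) + 1) 1) PySem.Set.empty = true)
      ↔ ¬ pvDup cs L := by
  have hc : ((cs.length : Int) - (L : Int) + 1) = ((cs.length - L + 1 : Nat) : Int) := by omega
  rw [hc, pvScanA_true_iff, mapSlice_eq_windows]
  constructor
  · rintro ⟨hnd, -⟩
    exact (windows_nodup_iff cs L hLn).mp hnd
  · intro h
    refine ⟨(windows_nodup_iff cs L hLn).mpr h, ?_⟩
    intro x _
    simp [PySem.Set.empty]

lemma pvOuterA_first (cs : List Char) (n : Int) :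
    ∀ (k : Nat) (a b t : Int), t - a = (k : Int) → a ≤ t → t < b →
      (∀ L : Int, a ≤ L → L < t →
        pvScanA cs L (PySem.List.pyRange 0 (n - L + 1) 1) PySem.Set.empty = false) →
      pvScanA cs t (PySem.List.pyRange 0 (n - t + 1) 1) PySem.Set.empty = true →
      pvOuterA cs n (PySem.List.pyRange a b 1) = t := by
  intro k
  induction k with
  | zero =>
    intro a b t hk hat htb _ htrue
    have hat' : a = t := by omega
    subst hat'
    rw [PySem.List.pyRange_one_cons (by omega)]
    simp only [pvOuterA]
    rw [htrue]
    simp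
  | succ k ih =>
    intro a b t hk hat htb hfalse htrue
    have hlt : a < t := by omega
    rw [PySem.List.pyRange_one_cons (by omega)]
    simp only [pvOuterA]
    rw [hfalse a le_rfl hlt]
    simp only [Bool.false_eq_true, if_false]
    exact ih (a + 1) b t (by omega) (by omega) htb (fun L h1 h2 => hfalse L (by omega) h2) htrue

-- ---------- B side: fold characterisation ----------

lemma innerB_fold (cs : List Char) (d : Nat) :
    ∀ (a : Nat) (b : Int), a + d < cs.length →
      ((PySem.List.pyRange ((a : Nat) : Int) (-1) (-1)).foldl
        (fun (p : Int × Int) i =>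
          let run := if PySem.List.pyGetD cs i ' ' = PySem.List.pyGetD cs (i + ((d : Nat) : Int)) ' '
                     then p.1 + 1 else 0
          (run, if run > p.2 then run else p.2))
        (((pvStreak cs d (a + 1) : Nat) : Int), b))
      = (((pvStreak cs d 0 : Nat) : Int), max b ((pvMaxRun cs d a : Nat) : Int)) := by
  intro a
  induction a with
  | zero =>
    intro b h
    rw [show (((0 : Nat) : Int)) = (0 : Int) by simp]
    rw [PySem.List.pyRange_neg_one_cons (by omega)]
    rw [show ((0 : Int) - 1) = (-1 : Int) by ring]
    rw [PySem.List.pyRange_neg_one_eq_nil (by omega)]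
    simp only [List.foldl_cons, List.foldl_nil]
    have hrun : (if PySem.List.pyGetD cs 0 ' ' = PySem.List.pyGetD cs (0 + ((d : Nat) : Int)) ' '
        then ((pvStreak cs d (0 + 1) : Nat) : Int) + 1 else 0) = ((pvStreak cs d 0 : Nat) : Int) := by
      rw [zero_add, PySem.List.pyGetD_zero, PySem.List.pyGetD_natCast]
      by_cases hc : cs.getD 0 ' ' = cs.getD d ' '
      · rw [if_pos hc]
        rw [pvStreak_pos cs d 0 (by omega) (by simpa using hc)]
        push_cast; ring
      · rw [if_neg hc]
        rw [pvStreak_zero cs d 0 (by rintro ⟨-, he⟩; exact hc (by simpa using he))]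
        simp
    rw [hrun]
    simp only [pvMaxRun, Prod.mk.injEq]
    refine ⟨by trivial, ?_⟩
    simp only [max_def]
    split_ifs <;> omega
  | succ a ih =>
    intro b h
    rw [PySem.List.pyRange_neg_one_cons (by omega)]
    rw [show (((a + 1 : Nat) : Int) - 1) = ((a : Nat) : Int) by push_cast; ring]
    simp only [List.foldl_cons]
    have hrun : (if PySem.List.pyGetD cs ((a + 1 : Nat) : Int) ' '
          = PySem.List.pyGetD cs (((a + 1 : Nat) : Int) + ((d : Nat) : Int)) ' '
        then ((pvStreak cs d (a + 1 + 1) : Nat) : Int) + 1 else 0)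
        = ((pvStreak cs d (a + 1) : Nat) : Int) := by
      rw [show (((a + 1 : Nat) : Int) + ((d : Nat) : Int)) = ((a + 1 + d : Nat) : Int) by push_cast; ring]
      rw [PySem.List.pyGetD_natCast, PySem.List.pyGetD_natCast]
      by_cases hc : cs.getD (a + 1) ' ' = cs.getD (a + 1 + d) ' '
      · rw [if_pos hc]
        rw [pvStreak_pos cs d (a + 1) (by omega) hc]
        push_cast; ring
      · rw [if_neg hc]
        rw [pvStreak_zero cs d (a + 1) (by rintro ⟨-, he⟩; exact hc he)]
        simp
    rw [hrun]
    rw [ih (if ((pvStreak cs d (a + 1) : Nat) : Int) > b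
            then ((pvStreak cs d (a + 1) : Nat) : Int) else b) (by omega)]
    simp only [pvMaxRun, Nat.cast_max, Prod.mk.injEq]
    refine ⟨by trivial, ?_⟩
    simp only [max_def]
    split_ifs <;> omega

lemma maxRun_ub (cs : List Char) (d : Nat) :
    ∀ (a i : Nat), i ≤ a → pvStreak cs d i ≤ pvMaxRun cs d a := by
  intro a
  induction a with
  | zero =>
    intro i hi
    have : i = 0 := by omega
    subst this
    simp [pvMaxRun]
  | succ a ih =>
    intro i hi
    simp only [pvMaxRun]
    rcases Nat.lt_or_ge i (a + 1) with h | h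
    · exact le_trans (ih i (by omega)) (le_max_left _ _)
    · have hi' : i = a + 1 := by omega
      subst hi'
      exact le_max_right _ _

lemma maxRun_attain (cs : List Char) (d : Nat) :
    ∀ a : Nat, ∃ i, i ≤ a ∧ pvMaxRun cs d a = pvStreak cs d i := by
  intro a
  induction a with
  | zero => exact ⟨0, le_rfl, rfl⟩
  | succ a ih =>
    obtain ⟨i, hi, heq⟩ := ih
    simp only [pvMaxRun]
    rcases max_choice (pvMaxRun cs d a) (pvStreak cs d (a + 1)) with h | h
    · exact ⟨i, by omega, by rw [h, heq]⟩
    · exact ⟨a + 1, le_rfl, by rw [h]⟩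

lemma streak_le (cs : List Char) (d : Nat) :
    ∀ (k i : Nat), cs.length - i ≤ k → pvStreak cs d i ≤ cs.length - (i + d) := by
  intro k
  induction k with
  | zero =>
    intro i hk
    rw [pvStreak_zero cs d i (by rintro ⟨hlt, -⟩; omega)]
    omega
  | succ k ih =>
    intro i hk
    by_cases h : i + d < cs.length ∧ cs.getD i ' ' = cs.getD (i + d) ' '
    · rw [pvStreak_pos cs d i h.1 h.2]
      have h2 := ih (i + 1) (by omega)
      omega
    · rw [pvStreak_zero cs d i h]
      omega

lemma streak_le' (cs : List Char) (d i : Nat) : pvStreak cs d i ≤ cs.length - (i + d) :=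
  streak_le cs d (cs.length - i) i le_rfl

lemma maxRun_le (cs : List Char) (d a : Nat) : pvMaxRun cs d a ≤ cs.length - d := by
  obtain ⟨i, -, he⟩ := maxRun_attain cs d a
  rw [he]
  have := streak_le' cs d i
  omega

lemma big_stable (cs : List Char) (dm : Nat) (h : cs.length - (dm + 1) ≤ pvBig cs dm) :
    pvBig cs (dm + 1) = pvBig cs dm := by
  simp only [pvBig]
  apply max_eq_left
  have := maxRun_le cs (dm + 1) (cs.length - (dm + 1) - 1)
  omega

lemma big_stable_upto (cs : List Char) (d0 : Nat) (h : cs.length - d0 ≤ pvBig cs (d0 - 1))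
    (h1 : 1 ≤ d0) : ∀ k : Nat, pvBig cs (d0 - 1 + k) = pvBig cs (d0 - 1) := by
  intro k
  induction k with
  | zero => rfl
  | succ k ih =>
    rw [show d0 - 1 + (k + 1) = (d0 - 1 + k) + 1 by omega]
    rw [big_stable cs (d0 - 1 + k) (by rw [ih]; omega)]
    exact ih

lemma loopB_eq (cs : List Char) :
    ∀ (k d0 : Nat), 1 ≤ d0 → d0 + k = cs.length →
      pvLoopB cs (cs.length : Int) (PySem.List.pyRange ((d0 : Nat) : Int) (cs.length : Int) 1)
          ((pvBig cs (d0 - 1) : Nat) : Int)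
        = ((pvBig cs (cs.length - 1) : Nat) : Int) := by
  intro k
  induction k with
  | zero =>
    intro d0 h1 hk
    rw [PySem.List.pyRange_one_eq_nil (by omega)]
    simp only [pvLoopB]
    have he : d0 - 1 = cs.length - 1 := by omega
    rw [he]
  | succ k ih =>
    intro d0 h1 hk
    rw [PySem.List.pyRange_one_cons (by omega : ((d0 : Nat) : Int) < (cs.length : Int))]
    simp only [pvLoopB]
    by_cases hbr : (cs.length : Int) - ((d0 : Nat) : Int) ≤ ((pvBig cs (d0 - 1) : Nat) : Int)
    · rw [if_pos hbr]
      have hs := big_stable_upto cs d0 (by omega) h1 (cs.length - d0)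
      rw [show cs.length - 1 = d0 - 1 + (cs.length - d0) by omega, hs]
    · rw [if_neg hbr]
      have hrng : ((cs.length : Int) - ((d0 : Nat) : Int) - 1)
          = ((cs.length - d0 - 1 : Nat) : Int) := by omega
      rw [hrng]
      have hz : pvStreak cs d0 (cs.length - d0 - 1 + 1) = 0 :=
        pvStreak_zero cs d0 _ (by rintro ⟨hlt, -⟩; omega)
      rw [show ((0 : Int), ((pvBig cs (d0 - 1) : Nat) : Int))
          = (((pvStreak cs d0 (cs.length - d0 - 1 + 1) : Nat) : Int),
             ((pvBig cs (d0 - 1) : Nat) : Int)) by rw [hz]; simp]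
      rw [innerB_fold cs d0 (cs.length - d0 - 1) ((pvBig cs (d0 - 1) : Nat) : Int) (by omega)]
      have hbig : max ((pvBig cs (d0 - 1) : Nat) : Int)
          ((pvMaxRun cs d0 (cs.length - d0 - 1) : Nat) : Int) = ((pvBig cs d0 : Nat) : Int) := by
        rw [show d0 = (d0 - 1) + 1 by omega]
        simp only [pvBig, Nat.cast_max]
        congr 3
      rw [hbig]
      rw [show ((d0 : Nat) : Int) + 1 = ((d0 + 1 : Nat) : Int) by push_cast; ring]
      have h2 := ih (d0 + 1) (by omega) (by omega)
      rw [show d0 + 1 - 1 = d0 by omega] at h2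
      exact h2

-- ---------- bridge: duplicates ↔ match runs ----------

lemma streak_ge_iff (cs : List Char) (d : Nat) :
    ∀ (L i : Nat), 1 ≤ L →
      (L ≤ pvStreak cs d i ↔
        i + d + L ≤ cs.length ∧ ∀ t, t < L → cs.getD (i + t) ' ' = cs.getD (i + d + t) ' ') := by
  intro L
  induction L with
  | zero => intro i h; exact absurd h (by omega)
  | succ L ih =>
    intro i _
    by_cases hcond : i + d < cs.length ∧ cs.getD i ' ' = cs.getD (i + d) ' '
    · rw [pvStreak_pos cs d i hcond.1 hcond.2]
      rcases Nat.eq_zero_or_pos L with rfl | hL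
      · constructor
        · intro _
          refine ⟨by omega, ?_⟩
          intro t ht
          have ht0 : t = 0 := by omega
          subst ht0
          simpa using hcond.2
        · intro _; omega
      · rw [Nat.succ_le_succ_iff]
        rw [ih (i + 1) hL]
        constructor
        · rintro ⟨hlen, hall⟩
          refine ⟨by omega, ?_⟩
          intro t ht
          rcases Nat.eq_zero_or_pos t with rfl | ht0
          · simpa using hcond.2
          · obtain ⟨t', rfl⟩ : ∃ t', t = t' + 1 := ⟨t - 1, by omega⟩
            have h2 := hall t' (by omega)
            rw [show i + 1 + t' = i + (t' + 1) by omega,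
                show i + 1 + d + t' = i + d + (t' + 1) by omega] at h2
            exact h2
        · rintro ⟨hlen, hall⟩
          refine ⟨by omega, ?_⟩
          intro t ht
          have h2 := hall (t + 1) (by omega)
          rw [show i + (t + 1) = i + 1 + t by omega,
              show i + d + (t + 1) = i + 1 + d + t by omega] at h2
          exact h2
    · rw [pvStreak_zero cs d i hcond]
      constructor
      · intro h; omega
      · rintro ⟨hlen, hall⟩
        exfalso
        apply hcond
        refine ⟨by omega, ?_⟩
        have h2 := hall 0 (by omega)
        simpa using h2

lemma sub_eq_iff (cs : List Char) (i j L : Nat) (hi : i + L ≤ cs.length) (hj : j + L ≤ cs.length) :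
    pvSub cs i L = pvSub cs j L ↔ ∀ t, t < L → cs.getD (i + t) ' ' = cs.getD (j + t) ' ' := by
  constructor
  · intro h t ht
    have h2 := congrArg (fun l => l[t]?) h
    simp only [pvSub, List.getElem?_take, List.getElem?_drop, ht, if_pos] at h2
    have hit : i + t < cs.length := by omega
    have hjt : j + t < cs.length := by omega
    rw [List.getElem?_eq_getElem hit, List.getElem?_eq_getElem hjt] at h2
    rw [List.getD_eq_getElem cs ' ' hit, List.getD_eq_getElem cs ' ' hjt]
    exact Option.some.inj h2
  · intro h
    apply List.ext_getElem?
    intro t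
    by_cases ht : t < L
    · simp only [pvSub, List.getElem?_take, List.getElem?_drop, ht, if_pos]
      have hit : i + t < cs.length := by omega
      have hjt : j + t < cs.length := by omega
      rw [List.getElem?_eq_getElem hit, List.getElem?_eq_getElem hjt]
      have h2 := h t ht
      rw [List.getD_eq_getElem cs ' ' hit, List.getD_eq_getElem cs ' ' hjt] at h2
      exact congrArg some h2
    · simp [pvSub, ht]

lemma dup_iff_streak (cs : List Char) (L : Nat) (hL : 1 ≤ L) :
    pvDup cs L ↔ ∃ d i : Nat, 1 ≤ d ∧ i + d + L ≤ cs.length ∧ L ≤ pvStreak cs d i := by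
  constructor
  · rintro ⟨i, j, hij, hjL, heq⟩
    refine ⟨j - i, i, by omega, by omega, ?_⟩
    rw [streak_ge_iff cs (j - i) L i hL]
    refine ⟨by omega, ?_⟩
    intro t ht
    have h2 := (sub_eq_iff cs i j L (by omega) hjL).mp heq t ht
    rw [show i + (j - i) + t = j + t by omega]
    exact h2
  · rintro ⟨d, i, hd, hle, hs⟩
    have h2 := (streak_ge_iff cs d L i hL).mp hs
    refine ⟨i, i + d, by omega, by omega, ?_⟩
    rw [sub_eq_iff cs i (i + d) L (by omega) (by omega)]
    intro t ht
    exact h2.2 t ht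

-- ---------- extrema of pvBig ----------

lemma big_ub (cs : List Char) :
    ∀ (dm d i : Nat), 1 ≤ d → d ≤ dm → i + d < cs.length →
      pvStreak cs d i ≤ pvBig cs dm := by
  intro dm
  induction dm with
  | zero => intro d i h1 h2 _; omega
  | succ dm ih =>
    intro d i h1 h2 h3
    simp only [pvBig]
    rcases Nat.lt_or_ge d (dm + 1) with h | h
    · exact le_trans (ih d i h1 (by omega) h3) (le_max_left _ _)
    · have hd : d = dm + 1 := by omega
      subst hd
      exact le_trans (maxRun_ub cs (dm + 1) (cs.length - (dm + 1) - 1) i (by omega)) (le_max_right _ _)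

lemma big_attain (cs : List Char) :
    ∀ dm : Nat, dm < cs.length →
      pvBig cs dm = 0 ∨
        ∃ d i, 1 ≤ d ∧ d ≤ dm ∧ i + d < cs.length ∧ pvStreak cs d i = pvBig cs dm := by
  intro dm
  induction dm with
  | zero => intro _; left; rfl
  | succ dm ih =>
    intro h
    simp only [pvBig]
    rcases max_choice (pvBig cs dm) (pvMaxRun cs (dm + 1) (cs.length - (dm + 1) - 1)) with hm | hm <;>
      rw [hm]
    · rcases ih (by omega) with h0 | ⟨d, i, h1, h2, h3, h4⟩
      · left; exact h0
      · right; exact ⟨d, i, h1, by omega, h3, h4⟩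
    · obtain ⟨i, hi, hei⟩ := maxRun_attain cs (dm + 1) (cs.length - (dm + 1) - 1)
      right
      exact ⟨dm + 1, i, by omega, le_rfl, by omega, hei.symm⟩

-- ===== VERDICT (by name: the statement is the Claim_ definition above) =====
theorem find_min_unique_substring_length_spec : Claim_equal_find_min_unique_substring_length := by
  intro s _hdom hpre
  unfold Spec_find_min_unique_substring_length
  have hne : s.toList ≠ [] := by
    intro h
    apply hpre
    exact String.toList_eq_nil_iff.mp h
  unfold find_min_unique_substring_length find_min_unique_substring_length_alt
  simp only [PySem.Str.len_eq]
  generalize hcs : s.toList = cs at *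
  have hn1 : 1 ≤ cs.length := List.length_pos_of_ne_nil hne
  -- abbreviation facts about BB := pvBig cs (cs.length - 1)
  have hBBlt : pvBig cs (cs.length - 1) < cs.length := by
    rcases big_attain cs (cs.length - 1) (by omega) with h0 | ⟨d, i, h1, h2, h3, h4⟩
    · omega
    · by_cases hz : pvBig cs (cs.length - 1) = 0
      · omega
      · have h5 := (streak_ge_iff cs d (pvBig cs (cs.length - 1)) i (by omega)).mp (le_of_eq h4.symm)
        omega
  have hfalse : ∀ L : Int, 1 ≤ L → L < ((pvBig cs (cs.length - 1) + 1 : Nat) : Int) →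
      pvScanA cs L (PySem.List.pyRange 0 ((cs.length : Int) - L + 1) 1) PySem.Set.empty = false := by
    intro L h1 h2
    have hLN : L = ((L.toNat : Nat) : Int) := by omega
    have hb1 : 1 ≤ L.toNat := by omega
    have hb2 : L.toNat ≤ pvBig cs (cs.length - 1) := by omega
    have hdup : pvDup cs L.toNat := by
      rcases big_attain cs (cs.length - 1) (by omega) with h0 | ⟨d, i, hd1, hd2, hd3, hd4⟩
      · omega
      · have hup := (streak_ge_iff cs d (pvBig cs (cs.length - 1)) i (by omega)).mp (le_of_eq hd4.symm)
        exact (dup_iff_streak cs L.toNat hb1).mpr ⟨d, i, hd1, by omega, by omega⟩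
    rw [hLN]
    cases hsc : pvScanA cs ((L.toNat : Nat) : Int)
        (PySem.List.pyRange 0 ((cs.length : Int) - ((L.toNat : Nat) : Int) + 1) 1)
        PySem.Set.empty with
    | false => rfl
    | true =>
      exact absurd ((scan_iff_nodup cs L.toNat (by omega)).mp hsc) (not_not_intro hdup)
  have hnotdup : ¬ pvDup cs (pvBig cs (cs.length - 1) + 1) := by
    intro hdup
    obtain ⟨d, i, hd1, hle, hs⟩ := (dup_iff_streak cs _ (by omega)).mp hdup
    have h2 := big_ub cs (cs.length - 1) d i hd1 (by omega) (by omega)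
    omega
  have htrue : pvScanA cs (((pvBig cs (cs.length - 1) + 1 : Nat)) : Int)
      (PySem.List.pyRange 0 ((cs.length : Int) - ((pvBig cs (cs.length - 1) + 1 : Nat) : Int) + 1) 1)
      PySem.Set.empty = true :=
    (scan_iff_nodup cs _ (by omega)).mpr hnotdup
  have houter := pvOuterA_first cs (cs.length : Int) (pvBig cs (cs.length - 1)) 1
    ((cs.length : Int) + 1) (((pvBig cs (cs.length - 1) + 1 : Nat)) : Int)
    (by omega) (by omega) (by push_cast; omega) hfalse htrue
  rw [houter]
  have hloop := loopB_eq cs (cs.length - 1) 1 (by omega) (by omega)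
  simp only [Nat.cast_one] at hloop
  rw [show (0 : Int) = ((pvBig cs (1 - 1) : Nat) : Int) by simp [pvBig]]
  rw [hloop]
  push_cast
  ring
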